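-- pv_equiv track=rewrite | github.com/ScottMorse/PyMusician | pymusician/_modules/_note.py | note_names_from_hard_pitch
-- ===== SOURCE A (Python) =====
-- NOTE_VALUES = {
--     "C": (0,0), "D": (1,2),
--     "E": (2,4), "F": (3,5),
--     "G": (4,7), "A": (5,9),
--     "B": (6,11),
-- }
--
-- def note_names_from_hard_pitch(hard_pitch,prefer=None):
--     if type(hard_pitch) is not int:
--             raise ValueError("Hard pitch argument must be an integer.")
--     if prefer not in ("#","b",None):
--         raise ValueError("'prefer' parameter should be set to '#' or 'b'.")
--     octave = hard_pitch // 12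
--     pitch = hard_pitch % 12
--     index = 0
--     for note_key in NOTE_VALUES:
--         if pitch == NOTE_VALUES[note_key][1]:
--             return (note_key,octave)
--         if pitch == NOTE_VALUES[note_key][1] + 1:
--             if prefer == "b":
--                 if index == 6:
--                     index = -1
--                 return (tuple(NOTE_VALUES.keys())[index + 1] + "b",octave)
--             return (note_key + "#",octave)
--         index += 1
-- ===== SOURCE B (Python) =====
-- # Table-driven implementation: one indexed lookup into a 12-entry (sharp,flat) name table.
-- _NAMES = (
--     ("C", "C"), ("C#", "Db"), ("D", "D"), ("D#", "Eb"),
--     ("E", "E"), ("F", "F"), ("F#", "Gb"), ("G", "G"),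
--     ("G#", "Ab"), ("A", "A"), ("A#", "Bb"), ("B", "B"),
-- )
--
-- def note_names_from_hard_pitch(hard_pitch, prefer=None):
--     if type(hard_pitch) is not int:
--         raise ValueError("Hard pitch argument must be an integer.")
--     if prefer not in ("#", "b", None):
--         raise ValueError("'prefer' parameter should be set to '#' or 'b'.")
--     sharp, flat = _NAMES[hard_pitch % 12]
--     return (flat if prefer == "b" else sharp, hard_pitch // 12)
-- ===== Notes on version B (the rewrite author's own statement) =====
-- stated objective: idiomatic
-- what changed: Replaced the indexed scan over the NOTE_VALUES dict (with its sharp/flat branch and keys-tuple wraparound) by a single lookup in a 12-entry (sharp,flat) name table indexed by pitch % 12.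
-- intended difference: On inputs with hard_pitch % 12 == 5 (natural F), A returns 'E#' (or 'Fb' with prefer='b', which is actually pitch 4) because the E+1 check fires before F's own exact match; B returns the intended plain 'F'. — e.g. on note_names_from_hard_pitch(5, none): A returns ("E#", 0), B returns ("F", 0)
import Mathlib
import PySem

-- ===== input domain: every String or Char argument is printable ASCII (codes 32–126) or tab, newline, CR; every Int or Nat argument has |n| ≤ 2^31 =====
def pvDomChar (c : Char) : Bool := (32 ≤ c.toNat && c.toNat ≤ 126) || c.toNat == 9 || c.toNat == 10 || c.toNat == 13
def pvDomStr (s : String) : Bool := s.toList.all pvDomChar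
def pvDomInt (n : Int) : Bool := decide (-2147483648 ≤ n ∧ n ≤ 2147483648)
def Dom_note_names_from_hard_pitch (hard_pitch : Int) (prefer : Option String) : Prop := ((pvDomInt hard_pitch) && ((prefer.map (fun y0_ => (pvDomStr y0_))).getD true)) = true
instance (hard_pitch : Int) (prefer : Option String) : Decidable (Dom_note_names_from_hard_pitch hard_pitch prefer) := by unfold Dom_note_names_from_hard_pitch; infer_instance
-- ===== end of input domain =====

-- B replaces A's indexed scan over NOTE_VALUES by one lookup in a 12-entry (sharp,flat) table (idiomatic);
-- on pitch class 5 A's scan mislabels natural F as E#/Fb, B returns F (stated as an intended difference D_).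
-- ===== PORT A =====
def pvNoteValues : List (String × Int × Int) :=
  [("C", 0, 0), ("D", 1, 2), ("E", 2, 4), ("F", 3, 5), ("G", 4, 7), ("A", 5, 9), ("B", 6, 11)]

def pvKeys : List String := ["C", "D", "E", "F", "G", "A", "B"]

-- the for-loop over NOTE_VALUES; `none` = falling off the loop (unreachable for pitch in 0..11)
def pvLoopA (pitch octave : Int) (prefer : Option String) : List (String × Int × Int) → Int → Option (String × Int)
  | [], _ => none
  | (note_key, _, v) :: rest, index =>
    if pitch == v then some (note_key, octave)
    else if pitch == v + 1 then
      if prefer == some "b" then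
        let index := if index == 6 then (-1 : Int) else index
        some (((PySem.List.pyGet? pvKeys (index + 1)).getD "") ++ "b", octave)
      else some (note_key ++ "#", octave)
    else pvLoopA pitch octave prefer rest (index + 1)

def note_names_from_hard_pitch (hard_pitch : Int) (prefer : Option String) : String × Int :=
  -- the `type(hard_pitch) is not int` guard never fires for an Int argument
  if prefer = some "#" ∨ prefer = some "b" ∨ prefer = none then
    let octave := PySem.Int.floordiv hard_pitch 12
    let pitch := PySem.Int.mod hard_pitch 12
    (pvLoopA pitch octave prefer pvNoteValues 0).getD ("", 0)
  else ("", 0)  -- Python raises ValueError; excluded by Pre_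

-- ===== PORT B =====
def pvNames : List (String × String) :=
  [("C", "C"), ("C#", "Db"), ("D", "D"), ("D#", "Eb"),
   ("E", "E"), ("F", "F"), ("F#", "Gb"), ("G", "G"),
   ("G#", "Ab"), ("A", "A"), ("A#", "Bb"), ("B", "B")]

def note_names_from_hard_pitch_alt (hard_pitch : Int) (prefer : Option String) : String × Int :=
  if prefer = some "#" ∨ prefer = some "b" ∨ prefer = none then
    let sf := (PySem.List.pyGet? pvNames (PySem.Int.mod hard_pitch 12)).getD ("", "")
    ((if prefer == some "b" then sf.2 else sf.1), PySem.Int.floordiv hard_pitch 12)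
  else ("", 0)  -- Python raises ValueError; excluded by Pre_

-- ===== PRECONDITION & SPEC =====
-- Pre_ excludes exactly the inputs where A raises ValueError: prefer not in ("#","b",None).
def Pre_note_names_from_hard_pitch (hard_pitch : Int) (prefer : Option String) : Prop :=
  prefer = some "#" ∨ prefer = some "b" ∨ prefer = none
instance (hard_pitch : Int) (prefer : Option String) : Decidable (Pre_note_names_from_hard_pitch hard_pitch prefer) := by
  unfold Pre_note_names_from_hard_pitch; infer_instance
def pvWitness_note_names_from_hard_pitch : Int × Option String := (14, some "b")

-- On inputs with hard_pitch % 12 == 5 (natural F), A returns "E#" (or "Fb" with prefer="b",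
-- which is really pitch 4) because the E+1 check fires before F's own exact match; B returns
-- the intended plain "F".
def D_note_names_from_hard_pitch (hard_pitch : Int) (prefer : Option String) : Prop :=
  PySem.Int.mod hard_pitch 12 = 5
instance (hard_pitch : Int) (prefer : Option String) : Decidable (D_note_names_from_hard_pitch hard_pitch prefer) := by
  unfold D_note_names_from_hard_pitch; infer_instance

def Spec_note_names_from_hard_pitch (hard_pitch : Int) (prefer : Option String) (out : String × Int) : Prop := ¬ D_note_names_from_hard_pitch hard_pitch prefer → out = note_names_from_hard_pitch_alt hard_pitch prefer
instance (hard_pitch : Int) (prefer : Option String) (out : String × Int) : Decidable (Spec_note_names_from_hard_pitch hard_pitch prefer out) := by unfold Spec_note_names_from_hard_pitch; infer_instance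

def pvDiffWitness_note_names_from_hard_pitch : Int × Option String := (5, none)
def pvDiffWitnessOut_note_names_from_hard_pitch : (String × Int) × (String × Int) := (("E#", 0), ("F", 0))

-- ===== CLAIM (what is proved, stated in full; the proofs are below) =====
def Claim_unchanged_note_names_from_hard_pitch : Prop := ∀ (hard_pitch : Int) (prefer : Option String), Dom_note_names_from_hard_pitch hard_pitch prefer → Pre_note_names_from_hard_pitch hard_pitch prefer → Spec_note_names_from_hard_pitch hard_pitch prefer (note_names_from_hard_pitch hard_pitch prefer)
def Claim_changed_note_names_from_hard_pitch : Prop := Dom_note_names_from_hard_pitch (pvDiffWitness_note_names_from_hard_pitch.1) (pvDiffWitness_note_names_from_hard_pitch.2) ∧ Pre_note_names_from_hard_pitch (pvDiffWitness_note_names_from_hard_pitch.1) (pvDiffWitness_note_names_from_hard_pitch.2) ∧ D_note_names_from_hard_pitch (pvDiffWitness_note_names_from_hard_pitch.1) (pvDiffWitness_note_names_from_hard_pitch.2) ∧ note_names_from_hard_pitch (pvDiffWitness_note_names_from_hard_pitch.1) (pvDiffWitness_note_names_from_hard_pitch.2) = pvDiffWitnessOut_note_names_from_hard_pitch.1 ∧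 note_names_from_hard_pitch_alt (pvDiffWitness_note_names_from_hard_pitch.1) (pvDiffWitness_note_names_from_hard_pitch.2) = pvDiffWitnessOut_note_names_from_hard_pitch.2 ∧ pvDiffWitnessOut_note_names_from_hard_pitch.1 ≠ pvDiffWitnessOut_note_names_from_hard_pitch.2
def Claim_exact_note_names_from_hard_pitch : Prop := ∀ (hard_pitch : Int) (prefer : Option String), Dom_note_names_from_hard_pitch hard_pitch prefer → Pre_note_names_from_hard_pitch hard_pitch prefer → D_note_names_from_hard_pitch hard_pitch prefer → note_names_from_hard_pitch hard_pitch prefer ≠ note_names_from_hard_pitch_alt hard_pitch prefer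

-- ===== LEMMAS AND PROOFS =====
theorem pv_mod_bounds (hp : Int) : 0 ≤ PySem.Int.mod hp 12 ∧ PySem.Int.mod hp 12 < 12 := by
  rw [PySem.Int.mod_eq_emod_of_pos (by norm_num)]
  exact ⟨Int.emod_nonneg hp (by norm_num), Int.emod_lt_of_pos hp (by norm_num)⟩

theorem pv_key (pitch octave : Int) (prefer : Option String)
    (hv : prefer = some "#" ∨ prefer = some "b" ∨ prefer = none)
    (h0 : 0 ≤ pitch) (h1 : pitch < 12) (h5 : pitch ≠ 5) :
    (pvLoopA pitch octave prefer pvNoteValues 0).getD ("", 0) =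
      ((if prefer == some "b"
        then ((PySem.List.pyGet? pvNames pitch).getD ("", "")).2
        else ((PySem.List.pyGet? pvNames pitch).getD ("", "")).1), octave) := by
  rcases hv with h | h | h <;> subst h <;> interval_cases pitch <;> first | rfl | (exact absurd rfl h5)

theorem pv_key5 (octave : Int) (prefer : Option String)
    (hv : prefer = some "#" ∨ prefer = some "b" ∨ prefer = none) :
    (pvLoopA 5 octave prefer pvNoteValues 0).getD ("", 0) =
      ((if prefer == some "b" then "Fb" else "E#"), octave) := by
  rcases hv with h | h | h <;> subst h <;> rfl

-- ===== VERDICT (by name: the statements are the Claim_ definitions above) =====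
theorem note_names_from_hard_pitch_spec : Claim_unchanged_note_names_from_hard_pitch := by
  intro hp prefer _ hpre hD
  unfold note_names_from_hard_pitch note_names_from_hard_pitch_alt
  have hv : prefer = some "#" ∨ prefer = some "b" ∨ prefer = none := hpre
  rw [if_pos hv, if_pos hv]
  obtain ⟨h0, h1⟩ := pv_mod_bounds hp
  exact pv_key _ _ prefer hv h0 h1 hD

theorem note_names_from_hard_pitch_changed : Claim_changed_note_names_from_hard_pitch := by
  unfold Claim_changed_note_names_from_hard_pitch; decide

theorem note_names_from_hard_pitch_tight : Claim_exact_note_names_from_hard_pitch := by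
  intro hp prefer _ hpre hD
  unfold note_names_from_hard_pitch note_names_from_hard_pitch_alt
  have hv : prefer = some "#" ∨ prefer = some "b" ∨ prefer = none := hpre
  rw [if_pos hv, if_pos hv]
  unfold D_note_names_from_hard_pitch at hD
  rw [hD, pv_key5 _ prefer hv]
  rcases hv with h | h | h <;> subst h <;> simp [pvNames, PySem.List.pyGet?, PySem.List.pyIdx?]
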